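-- pv_equiv track=rewrite | github.com/rgacogne/pdns | pdns/dnsdistdist/dnsdist-rust-lib/settings-generator.py | should_validate_type
-- ===== SOURCE A (Python) =====
-- def get_vector_sub_type(rust_type):
--     return rust_type[4:-1]
--
-- def is_vector_of(rust_type):
--     return rust_type.startswith('Vec<')
--
-- def should_validate_type(rust_type):
--     if is_vector_of(rust_type):
--         sub_type = get_vector_sub_type(rust_type)
--         return should_validate_type(sub_type)
--     if rust_type in ['bool', 'u8', 'u16', 'u32', 'u64', 'f64', 'String']:
--         return False
--     if rust_type in ['Selector', 'dnsdistsettings::SelectorsConfiguration']: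
--         return False
--     return True
-- ===== SOURCE B (Python) =====
-- def should_validate_type(rust_type):
--     while rust_type.startswith('Vec<'):
--         rust_type = rust_type[4:-1]
--     return rust_type not in ('bool', 'u8', 'u16', 'u32', 'u64', 'f64', 'String',
--                              'Selector', 'dnsdistsettings::SelectorsConfiguration')
-- ===== Notes on version B (the rewrite author's own statement) =====
-- stated objective: simpler
-- what changed: Replaces the helper-based recursion with an iterative while loop that strips all Vec<...> wrappers, then a single membership test against one tuple merging both exclusion lists.
import Mathlib
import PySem

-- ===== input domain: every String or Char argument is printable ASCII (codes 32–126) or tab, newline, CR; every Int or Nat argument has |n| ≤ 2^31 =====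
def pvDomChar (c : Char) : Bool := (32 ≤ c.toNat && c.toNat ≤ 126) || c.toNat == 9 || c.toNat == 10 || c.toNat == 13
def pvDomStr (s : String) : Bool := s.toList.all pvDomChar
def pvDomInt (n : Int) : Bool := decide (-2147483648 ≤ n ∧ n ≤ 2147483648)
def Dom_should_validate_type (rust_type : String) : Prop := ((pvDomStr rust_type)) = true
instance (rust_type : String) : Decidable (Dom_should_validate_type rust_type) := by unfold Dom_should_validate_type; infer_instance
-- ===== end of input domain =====

-- B replaces A's recursion with an iterative Vec<-stripping loop and one merged membership test; objective: simpler.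

-- ===== PORT A =====
-- rust_type[4:-1]
def get_vector_sub_type (cs : List Char) : List Char :=
  PySem.List.slice cs (some 4) (some (-1))

-- rust_type.startswith('Vec<')
def is_vector_of (cs : List Char) : Bool :=
  PySem.Chars.startswith cs ['V', 'e', 'c', '<']

theorem pv_sub_lt (cs : List Char) (h : is_vector_of cs = true) :
    (get_vector_sub_type cs).length < cs.length := by
  have hp : ['V', 'e', 'c', '<'] <+: cs := (PySem.Chars.startswith_iff _ _).1 h
  have hlen : 4 ≤ cs.length := by
    have := hp.length_le; simpa using this
  have : (get_vector_sub_type cs).length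
      = PySem.List.clampIdx cs.length (-1) - PySem.List.clampIdx cs.length 4 := by
    simp [get_vector_sub_type, PySem.List.length_slice]
  rw [this]
  have h1 : PySem.List.clampIdx cs.length (-1) = cs.length - 1 := by
    simp [PySem.List.clampIdx_neg_one]
  have h4 : PySem.List.clampIdx cs.length (4 : Int) = min 4 cs.length := by
    simpa using PySem.List.clampIdx_natCast cs.length 4
  omega

def should_validate_type_core (cs : List Char) : Bool :=
  if is_vector_of cs then
    should_validate_type_core (get_vector_sub_type cs)
  else if cs ∈ (["bool", "u8", "u16", "u32", "u64", "f64", "String"].map String.toList) then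
    false
  else if cs ∈ (["Selector", "dnsdistsettings::SelectorsConfiguration"].map String.toList) then
    false
  else
    true
termination_by cs.length
decreasing_by exact pv_sub_lt _ (by assumption)

def should_validate_type (rust_type : String) : Bool :=
  should_validate_type_core rust_type.toList

-- ===== PORT B =====
-- while rust_type.startswith('Vec<'): rust_type = rust_type[4:-1]
def strip_vecs (cs : List Char) : List Char :=
  if h : PySem.Chars.startswith cs ['V', 'e', 'c', '<'] then
    strip_vecs (PySem.List.slice cs (some 4) (some (-1)))
  else
    cs
termination_by cs.length
decreasing_by exact pv_sub_lt _ (by simpa [is_vector_of] using h)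

def pv_all_exempt : List (List Char) :=
  ["bool", "u8", "u16", "u32", "u64", "f64", "String",
   "Selector", "dnsdistsettings::SelectorsConfiguration"].map String.toList

def should_validate_type_alt (rust_type : String) : Bool :=
  !(strip_vecs rust_type.toList ∈ pv_all_exempt)

-- ===== PRECONDITION & SPEC =====
def Spec_should_validate_type (rust_type : String) (out : Bool) : Prop := out = should_validate_type_alt rust_type
instance (rust_type : String) (out : Bool) : Decidable (Spec_should_validate_type rust_type out) := by unfold Spec_should_validate_type; infer_instance

-- ===== CLAIM (what is proved, stated in full; the proofs are below) =====
def Claim_equal_should_validate_type : Prop := ∀ (rust_type : String), Dom_should_validate_type rust_type → Spec_should_validate_type rust_type (should_validate_type rust_type)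

-- ===== LEMMAS AND PROOFS =====
theorem mem_exempt_split (cs : List Char) :
    (cs ∈ pv_all_exempt) ↔
      cs ∈ (["bool", "u8", "u16", "u32", "u64", "f64", "String"].map String.toList) ∨
      cs ∈ (["Selector", "dnsdistsettings::SelectorsConfiguration"].map String.toList) := by
  simp only [pv_all_exempt, List.map, List.mem_cons, List.not_mem_nil, or_false]
  tauto

theorem core_eq_alt : ∀ (cs : List Char),
    should_validate_type_core cs = !(strip_vecs cs ∈ pv_all_exempt) := by
  intro cs
  induction hn : cs.length using Nat.strong_induction_on generalizing cs with
  | _ n ih =>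
    by_cases hv : is_vector_of cs = true
    · rw [should_validate_type_core, strip_vecs, if_pos hv,
        dif_pos (by simpa [is_vector_of] using hv)]
      have hlt := pv_sub_lt cs hv
      exact ih (get_vector_sub_type cs).length (by omega) _ rfl
    · rw [should_validate_type_core, strip_vecs, if_neg hv,
        dif_neg (by simpa [is_vector_of] using hv)]
      by_cases h1 : cs ∈ (["bool", "u8", "u16", "u32", "u64", "f64", "String"].map String.toList) <;>
        by_cases h2 : cs ∈ (["Selector", "dnsdistsettings::SelectorsConfiguration"].map String.toList) <;>
          simp [h1, h2, mem_exempt_split]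

-- ===== VERDICT (by name: the statement is the Claim_ definition above) =====
theorem should_validate_type_spec : Claim_equal_should_validate_type := by
  intro rust_type _
  unfold Spec_should_validate_type should_validate_type should_validate_type_alt
  exact core_eq_alt _
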